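-- pv_equiv track=rewrite | github.com/HackyRoot/flood-notifier | scraper_vercel.py | prep_data
-- ===== SOURCE A (Python) =====
-- def prep_data(scraped_data):
--     prepared_data = [''] * 20
--
--     # Map of location names to column indices
--     location_map = {
--         'AJWA DAM': 0,
--         'AKOTA BRIDGE': 2,
--         'ASOJ FEEDER': 4,
--         'BAHUCHARAJI BRIDGE': 6,
--         'KALA GHODA': 8,
--         'MANGAL PANDEY BRIDGE': 10,
--         'MUJMAUDA BRIDGE': 12,
--         'PRATAPPURA DAM': 14,
--         'SAMA HARNI BRIDGE': 16,
--         'VADSAR BRIDGE': 18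
--     }
--
--     for location, level, timestamp in scraped_data:
--         if location in location_map:
--             index = location_map[location]
--             prepared_data[index] = level
--             prepared_data[index + 1] = timestamp
--
--     return [prepared_data]
-- ===== SOURCE B (Python) =====
-- def prep_data(scraped_data):
--     locations = ['AJWA DAM', 'AKOTA BRIDGE', 'ASOJ FEEDER', 'BAHUCHARAJI BRIDGE',
--                  'KALA GHODA', 'MANGAL PANDEY BRIDGE', 'MUJMAUDA BRIDGE',
--                  'PRATAPPURA DAM', 'SAMA HARNI BRIDGE', 'VADSAR BRIDGE']
--     # index the scraped records once (last occurrence of a location wins, as in A)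
--     scraped = {loc: (level, ts) for loc, level, ts in scraped_data}
--     row = []
--     for loc in locations:
--         level, ts = scraped.get(loc, ('', ''))
--         row += [level, ts]
--     return [row]
-- ===== Notes on version B (the rewrite author's own statement) =====
-- stated objective: alternative
-- what changed: B inverts the traversal: instead of walking the records and placing each level/timestamp into a preallocated 20-slot list by a column-index lookup, it builds a location->(level,timestamp) dict from the records once (last occurrence wins, as in A's overwrite) and then constructs the row by walking the fixed column order, appending the pair or ('','') per location.
import Mathlib
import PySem

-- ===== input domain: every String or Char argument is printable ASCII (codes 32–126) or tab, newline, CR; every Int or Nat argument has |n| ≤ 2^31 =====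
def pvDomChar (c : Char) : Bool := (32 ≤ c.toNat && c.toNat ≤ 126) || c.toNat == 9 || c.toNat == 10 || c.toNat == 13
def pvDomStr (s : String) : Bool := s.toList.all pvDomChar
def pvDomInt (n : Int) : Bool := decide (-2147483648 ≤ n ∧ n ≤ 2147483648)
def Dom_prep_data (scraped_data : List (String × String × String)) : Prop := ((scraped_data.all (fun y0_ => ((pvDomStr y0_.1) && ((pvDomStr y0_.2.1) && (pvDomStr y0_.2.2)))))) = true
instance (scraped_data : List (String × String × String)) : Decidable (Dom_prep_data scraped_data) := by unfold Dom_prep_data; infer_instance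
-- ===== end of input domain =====

-- B replaces A's "walk records, place each by index lookup" with "index the records in a dict once,
-- then walk the fixed column order" (objective: alternative decomposition, same cost).

-- ===== PORT A =====
def pvLocMap : PySem.Dict String Int :=
  PySem.Dict.ofList
    [("AJWA DAM", 0), ("AKOTA BRIDGE", 2), ("ASOJ FEEDER", 4), ("BAHUCHARAJI BRIDGE", 6),
     ("KALA GHODA", 8), ("MANGAL PANDEY BRIDGE", 10), ("MUJMAUDA BRIDGE", 12),
     ("PRATAPPURA DAM", 14), ("SAMA HARNI BRIDGE", 16), ("VADSAR BRIDGE", 18)]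

def prep_data (scraped_data : List (String × String × String)) : List (List String) :=
  let prepared_data : List String := List.replicate 20 ""
  let prepared_data := scraped_data.foldl (fun pd r =>
    if pvLocMap.contains r.1 then
      let index := (pvLocMap.get? r.1).getD 0   -- location_map[location]; the guard guarantees presence
      PySem.List.pySetD (PySem.List.pySetD pd index r.2.1) (index + 1) r.2.2
    else pd) prepared_data
  [prepared_data]

-- ===== PORT B =====
def pvLocations : List String :=
  ["AJWA DAM", "AKOTA BRIDGE", "ASOJ FEEDER", "BAHUCHARAJI BRIDGE", "KALA GHODA",
   "MANGAL PANDEY BRIDGE", "MUJMAUDA BRIDGE", "PRATAPPURA DAM", "SAMA HARNI BRIDGE",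
   "VADSAR BRIDGE"]

def prep_data_alt (scraped_data : List (String × String × String)) : List (List String) :=
  let scraped : PySem.Dict String (String × String) :=
    scraped_data.foldl (fun d r => d.insert r.1 (r.2.1, r.2.2)) PySem.Dict.empty
  let row := pvLocations.foldl (fun acc loc =>
    let p := scraped.getD loc ("", "")
    acc ++ [p.1, p.2]) []
  [row]

-- ===== PRECONDITION & SPEC =====
def Spec_prep_data (scraped_data : List (String × String × String)) (out : List (List String)) : Prop := out = prep_data_alt scraped_data
instance (scraped_data : List (String × String × String)) (out : List (List String)) : Decidable (Spec_prep_data scraped_data out) := by unfold Spec_prep_data; infer_instance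

-- ===== CLAIM (what is proved, stated in full; the proofs are below) =====
def Claim_equal_prep_data : Prop := ∀ (scraped_data : List (String × String × String)), Dom_prep_data scraped_data → Spec_prep_data scraped_data (prep_data scraped_data)

-- ===== LEMMAS AND PROOFS =====

-- the row B builds from a dict d, as a function of d
def pvRow (d : PySem.Dict String (String × String)) : List String :=
  pvLocations.foldl (fun acc loc =>
    let p := d.getD loc ("", "")
    acc ++ [p.1, p.2]) []

lemma pvRow_explicit (d : PySem.Dict String (String × String)) :
    pvRow d =
      [(d.getD "AJWA DAM" ("", "")).1, (d.getD "AJWA DAM" ("", "")).2,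
       (d.getD "AKOTA BRIDGE" ("", "")).1, (d.getD "AKOTA BRIDGE" ("", "")).2,
       (d.getD "ASOJ FEEDER" ("", "")).1, (d.getD "ASOJ FEEDER" ("", "")).2,
       (d.getD "BAHUCHARAJI BRIDGE" ("", "")).1, (d.getD "BAHUCHARAJI BRIDGE" ("", "")).2,
       (d.getD "KALA GHODA" ("", "")).1, (d.getD "KALA GHODA" ("", "")).2,
       (d.getD "MANGAL PANDEY BRIDGE" ("", "")).1, (d.getD "MANGAL PANDEY BRIDGE" ("", "")).2,
       (d.getD "MUJMAUDA BRIDGE" ("", "")).1, (d.getD "MUJMAUDA BRIDGE" ("", "")).2,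
       (d.getD "PRATAPPURA DAM" ("", "")).1, (d.getD "PRATAPPURA DAM" ("", "")).2,
       (d.getD "SAMA HARNI BRIDGE" ("", "")).1, (d.getD "SAMA HARNI BRIDGE" ("", "")).2,
       (d.getD "VADSAR BRIDGE" ("", "")).1, (d.getD "VADSAR BRIDGE" ("", "")).2] := by
  simp [pvRow, pvLocations, List.foldl]

-- one record applied to A's row equals the row of the dict with that record inserted
lemma pv_step (d : PySem.Dict String (String × String)) (loc lv ts : String) :
    (if pvLocMap.contains loc then
       let index := (pvLocMap.get? loc).getD 0
       PySem.List.pySetD (PySem.List.pySetD (pvRow d) index lv) (index + 1) ts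
     else pvRow d) = pvRow (d.insert loc (lv, ts)) := by
  by_cases h1 : loc = "AJWA DAM"
  · subst h1
    simp [pvRow_explicit, show pvLocMap.contains "AJWA DAM" = true from rfl,
          show pvLocMap.get? "AJWA DAM" = some 0 from rfl,
          PySem.List.pySetD_of_nonneg, List.set, PySem.Dict.getD_insert]
  by_cases h2 : loc = "AKOTA BRIDGE"
  · subst h2
    simp [pvRow_explicit, show pvLocMap.contains "AKOTA BRIDGE" = true from rfl,
          show pvLocMap.get? "AKOTA BRIDGE" = some 2 from rfl,
          PySem.List.pySetD_of_nonneg, List.set, PySem.Dict.getD_insert]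
  by_cases h3 : loc = "ASOJ FEEDER"
  · subst h3
    simp [pvRow_explicit, show pvLocMap.contains "ASOJ FEEDER" = true from rfl,
          show pvLocMap.get? "ASOJ FEEDER" = some 4 from rfl,
          PySem.List.pySetD_of_nonneg, List.set, PySem.Dict.getD_insert]
  by_cases h4 : loc = "BAHUCHARAJI BRIDGE"
  · subst h4
    simp [pvRow_explicit, show pvLocMap.contains "BAHUCHARAJI BRIDGE" = true from rfl,
          show pvLocMap.get? "BAHUCHARAJI BRIDGE" = some 6 from rfl,
          PySem.List.pySetD_of_nonneg, List.set, PySem.Dict.getD_insert]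
  by_cases h5 : loc = "KALA GHODA"
  · subst h5
    simp [pvRow_explicit, show pvLocMap.contains "KALA GHODA" = true from rfl,
          show pvLocMap.get? "KALA GHODA" = some 8 from rfl,
          PySem.List.pySetD_of_nonneg, List.set, PySem.Dict.getD_insert]
  by_cases h6 : loc = "MANGAL PANDEY BRIDGE"
  · subst h6
    simp [pvRow_explicit, show pvLocMap.contains "MANGAL PANDEY BRIDGE" = true from rfl,
          show pvLocMap.get? "MANGAL PANDEY BRIDGE" = some 10 from rfl,
          PySem.List.pySetD_of_nonneg, List.set, PySem.Dict.getD_insert]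
  by_cases h7 : loc = "MUJMAUDA BRIDGE"
  · subst h7
    simp [pvRow_explicit, show pvLocMap.contains "MUJMAUDA BRIDGE" = true from rfl,
          show pvLocMap.get? "MUJMAUDA BRIDGE" = some 12 from rfl,
          PySem.List.pySetD_of_nonneg, List.set, PySem.Dict.getD_insert]
  by_cases h8 : loc = "PRATAPPURA DAM"
  · subst h8
    simp [pvRow_explicit, show pvLocMap.contains "PRATAPPURA DAM" = true from rfl,
          show pvLocMap.get? "PRATAPPURA DAM" = some 14 from rfl,
          PySem.List.pySetD_of_nonneg, List.set, PySem.Dict.getD_insert]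
  by_cases h9 : loc = "SAMA HARNI BRIDGE"
  · subst h9
    simp [pvRow_explicit, show pvLocMap.contains "SAMA HARNI BRIDGE" = true from rfl,
          show pvLocMap.get? "SAMA HARNI BRIDGE" = some 16 from rfl,
          PySem.List.pySetD_of_nonneg, List.set, PySem.Dict.getD_insert]
  by_cases h10 : loc = "VADSAR BRIDGE"
  · subst h10
    simp [pvRow_explicit, show pvLocMap.contains "VADSAR BRIDGE" = true from rfl,
          show pvLocMap.get? "VADSAR BRIDGE" = some 18 from rfl,
          PySem.List.pySetD_of_nonneg, List.set, PySem.Dict.getD_insert]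
  · have hk : pvLocMap.keys = ["AJWA DAM", "AKOTA BRIDGE", "ASOJ FEEDER", "BAHUCHARAJI BRIDGE",
        "KALA GHODA", "MANGAL PANDEY BRIDGE", "MUJMAUDA BRIDGE", "PRATAPPURA DAM",
        "SAMA HARNI BRIDGE", "VADSAR BRIDGE"] := rfl
    have hc : pvLocMap.contains loc = false := by
      rw [PySem.Dict.contains_eq_decide_mem_keys, hk]
      simp [h1, h2, h3, h4, h5, h6, h7, h8, h9, h10]
    simp [hc, pvRow_explicit, PySem.Dict.getD_insert, Ne.symm h1, Ne.symm h2, Ne.symm h3, Ne.symm h4, Ne.symm h5,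
          Ne.symm h6, Ne.symm h7, Ne.symm h8, Ne.symm h9, Ne.symm h10]

-- loop invariant: A's accumulated row equals B's row over the accumulated dict
lemma pv_invariant (xs : List (String × String × String)) :
    xs.foldl (fun pd r =>
        if pvLocMap.contains r.1 then
          let index := (pvLocMap.get? r.1).getD 0
          PySem.List.pySetD (PySem.List.pySetD pd index r.2.1) (index + 1) r.2.2
        else pd) (List.replicate 20 "")
      = pvRow (xs.foldl (fun d r => d.insert r.1 (r.2.1, r.2.2)) PySem.Dict.empty) := by
  induction xs using List.reverseRecOn with
  | nil => rfl
  | append_singleton xs x ih =>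
    rw [List.foldl_append, List.foldl_append, ih]
    simpa using pv_step _ x.1 x.2.1 x.2.2

-- ===== VERDICT (by name: the statement is the Claim_ definition above) =====
theorem prep_data_spec : Claim_equal_prep_data := by
  intro scraped_data _
  unfold Spec_prep_data prep_data prep_data_alt
  exact congrArg (fun r => [r]) (pv_invariant scraped_data)
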